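-- pv_equiv track=rewrite | github.com/shadowforce78/UVSQ-APP | app.py | get_nearest_hour
-- ===== SOURCE A (Python) =====
-- def get_nearest_hour(time_str):
--     """Trouve l'heure la plus proche dans la grille"""
--     hours = ["08:00", "09:00", "10:00", "11:00", "12:00", "13:00",
--              "14:00", "15:00", "16:00", "17:00", "18:00"]
--
--     try:
--         hour, minute = map(int, time_str.split(":"))
--         if minute >= 30:
--             hour += 1
--         target = f"{hour:02d}:00"
--
--         if target in hours:
--             return target
--         elif hour < 8:
--             return "08:00"
--         elif hour > 18:
--             return "18:00"
--         else:
--             # Trouver l'heure la plus proche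
--             for h in hours:
--                 if h > target:
--                     return h
--             return hours[-1]
--     except:
--         return "08:00"  # Valeur par défaut en cas d'erreur
-- ===== SOURCE B (Python) =====
-- def get_nearest_hour(time_str):
--     """Trouve l'heure la plus proche dans la grille (nearest-neighbour search:
--     minimize distance to the rounded hour over the grid 8..18)"""
--     try:
--         hour, minute = map(int, time_str.split(":"))
--         target = hour + (minute >= 30)
--         best = min(range(8, 19), key=lambda h: abs(h - target))
--         return f"{best:02d}:00"
--     except:
--         return "08:00"
-- ===== Notes on version B (the rewrite author's own statement) =====
-- stated objective: alternative
-- what changed: B replaces A's grid list, membership test, clamp branch chain and trailing lexicographic scan with a nearest-neighbour search: min(range(8,19), key=lambda h: abs(h - rounded_hour)), formatted once; same parse and bare-except default.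
import Mathlib
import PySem

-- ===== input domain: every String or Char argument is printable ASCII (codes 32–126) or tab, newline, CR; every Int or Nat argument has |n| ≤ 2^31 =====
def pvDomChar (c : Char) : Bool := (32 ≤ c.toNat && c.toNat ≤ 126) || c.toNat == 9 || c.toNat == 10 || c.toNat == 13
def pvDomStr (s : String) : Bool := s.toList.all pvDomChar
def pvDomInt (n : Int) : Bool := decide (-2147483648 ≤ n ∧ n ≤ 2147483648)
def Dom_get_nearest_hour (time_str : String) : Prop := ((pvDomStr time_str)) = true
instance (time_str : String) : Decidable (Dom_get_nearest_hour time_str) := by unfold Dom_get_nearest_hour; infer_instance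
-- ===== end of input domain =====

-- B replaces A's grid list + membership test + clamp branches + lexicographic scan by a
-- nearest-neighbour search: minimize |h - rounded hour| over the grid hours 8..18 with min(key=...).


-- ===== PORT A =====
-- f"{n:02d}" for an int n: pad with one '0' exactly when 0 ≤ n ≤ 9 (Python pads to width 2 incl. sign)
def pyFmt02 (n : Int) : List Char :=
  if 0 ≤ n ∧ n ≤ 9 then '0' :: PySem.Int.toChars n else PySem.Int.toChars n

-- the grid list `hours` of A
def hoursA : List String :=
  ["08:00", "09:00", "10:00", "11:00", "12:00", "13:00",
   "14:00", "15:00", "16:00", "17:00", "18:00"]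

-- A: parse (any failure → bare except → "08:00"), round, membership in the grid, clamp branches,
-- then the trailing scan (`for h in hours: if h > target: return h` / `return hours[-1]`).
def get_nearest_hour (time_str : String) : String :=
  match PySem.Str.split? time_str ":" with
  | some [a, b] =>
    match PySem.Int.ofStr? a, PySem.Int.ofStr? b with
    | some hour0, some minute =>
      let hour := if 30 ≤ minute then hour0 + 1 else hour0
      let target := String.ofList (pyFmt02 hour ++ [':', '0', '0'])
      if target ∈ hoursA then target
      else if hour < 8 then "08:00"
      else if 18 < hour then "18:00"
      else
        match hoursA.find? (fun h => decide (target.toList < h.toList)) with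
        | some h => h
        | none => "18:00"       -- hours[-1]
    | _, _ => "08:00"           -- ValueError from int() → bare except
  | _ => "08:00"                -- wrong number of parts → unpacking ValueError → bare except
-- (split? with a non-empty separator never returns none; the catch-all also covers that impossible branch)

-- ===== PORT B =====
-- B's own port of f"{n:02d}": pad with one '0' exactly when the rendering of n is a single digit
def pyFmt02B (n : Int) : List Char :=
  if n < 0 then PySem.Int.toChars n
  else if 10 ≤ n then PySem.Int.toChars n
  else '0' :: PySem.Int.toChars n

-- B: same parse and rounding, then a nearest-neighbour search over the grid hours:
-- `min(range(8, 19), key=lambda h: abs(h - target))` (first minimum), formatted once.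
def get_nearest_hour_alt (time_str : String) : String :=
  match PySem.Str.split? time_str ":" with
  | none => "08:00"
  | some parts =>
    match parts with
    | [] => "08:00"
    | [_] => "08:00"
    | _ :: _ :: _ :: _ => "08:00"   -- unpacking ValueError → bare except
    | [a, b] =>
      match PySem.Int.ofStr? a with
      | none => "08:00"
      | some hour0 =>
        match PySem.Int.ofStr? b with
        | none => "08:00"
        | some minute =>
          let target := hour0 + (if 30 ≤ minute then 1 else 0)
          match PySem.List.min? (PySem.List.pyRange 8 19 1) (fun h => |h - target|) with
          | some best => String.ofList (pyFmt02B best ++ [':', '0', '0'])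
          | none => "08:00"     -- unreachable: range(8, 19) is non-empty

-- ===== PRECONDITION & SPEC =====
def Spec_get_nearest_hour (time_str : String) (out : String) : Prop := out = get_nearest_hour_alt time_str
instance (time_str : String) (out : String) : Decidable (Spec_get_nearest_hour time_str out) := by unfold Spec_get_nearest_hour; infer_instance

-- ===== CLAIM (what is proved, stated in full; the proofs are below) =====
def Claim_equal_get_nearest_hour : Prop := ∀ (time_str : String), Dom_get_nearest_hour time_str → Spec_get_nearest_hour time_str (get_nearest_hour time_str)

-- ===== LEMMAS AND PROOFS =====

lemma gridList : PySem.List.pyRange 8 19 1 = [8, 9, 10, 11, 12, 13, 14, 15, 16, 17, 18] := by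
  decide

-- the nearest-neighbour search below the grid: first minimum is 8
lemma min_low (t : Int) (ht : t < 8) :
    PySem.List.min? (PySem.List.pyRange 8 19 1) (fun h => |h - t|) = some 8 := by
  have e : ∀ h : Int, 8 ≤ h → |h - t| = h - t := fun h hh => abs_of_nonneg (by omega)
  simp only [PySem.List.min?, gridList, List.foldl,
    e 8 (by norm_num), e 9 (by norm_num), e 10 (by norm_num), e 11 (by norm_num),
    e 12 (by norm_num), e 13 (by norm_num), e 14 (by norm_num), e 15 (by norm_num),
    e 16 (by norm_num), e 17 (by norm_num), e 18 (by norm_num),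
    if_neg (show ¬((9:Int) - t < 8 - t) by omega),
    if_neg (show ¬((10:Int) - t < 8 - t) by omega),
    if_neg (show ¬((11:Int) - t < 8 - t) by omega),
    if_neg (show ¬((12:Int) - t < 8 - t) by omega),
    if_neg (show ¬((13:Int) - t < 8 - t) by omega),
    if_neg (show ¬((14:Int) - t < 8 - t) by omega),
    if_neg (show ¬((15:Int) - t < 8 - t) by omega),
    if_neg (show ¬((16:Int) - t < 8 - t) by omega),
    if_neg (show ¬((17:Int) - t < 8 - t) by omega),
    if_neg (show ¬((18:Int) - t < 8 - t) by omega)]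

-- above the grid: every step improves, the minimum is 18
lemma min_high (t : Int) (ht : 18 < t) :
    PySem.List.min? (PySem.List.pyRange 8 19 1) (fun h => |h - t|) = some 18 := by
  have e : ∀ h : Int, h ≤ 18 → |h - t| = t - h := fun h hh => by
    rw [abs_sub_comm]; exact abs_of_nonneg (by omega)
  simp only [PySem.List.min?, gridList, List.foldl,
    e 8 (by norm_num), e 9 (by norm_num), e 10 (by norm_num), e 11 (by norm_num),
    e 12 (by norm_num), e 13 (by norm_num), e 14 (by norm_num), e 15 (by norm_num),
    e 16 (by norm_num), e 17 (by norm_num), e 18 (by norm_num),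
    if_pos (show (t - (9:Int) < t - 8) by omega),
    if_pos (show (t - (10:Int) < t - 9) by omega),
    if_pos (show (t - (11:Int) < t - 10) by omega),
    if_pos (show (t - (12:Int) < t - 11) by omega),
    if_pos (show (t - (13:Int) < t - 12) by omega),
    if_pos (show (t - (14:Int) < t - 13) by omega),
    if_pos (show (t - (15:Int) < t - 14) by omega),
    if_pos (show (t - (16:Int) < t - 15) by omega),
    if_pos (show (t - (17:Int) < t - 16) by omega),
    if_pos (show (t - (18:Int) < t - 17) by omega)]

-- inside the grid: the hour itself has distance 0 and is the unique minimum
lemma min_mid (t : Int) (h1 : 8 ≤ t) (h2 : t ≤ 18) :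
    PySem.List.min? (PySem.List.pyRange 8 19 1) (fun h => |h - t|) = some t := by
  interval_cases t <;> decide

-- length lower bound for Nat.toDigitsCore: a number ≥ 10 contributes at least 2 digit characters
lemma toDigitsCore_len_ge_two :
    ∀ (f n : Nat) (acc : List Char), 10 ≤ n → n < 10 ^ f →
      2 + acc.length ≤ (Nat.toDigitsCore 10 f n acc).length := by
  intro f
  induction f with
  | zero => intro n acc h1 h2; simp at h2; omega
  | succ f ih =>
    intro n acc h1 h2
    have hnd : ¬ n / 10 = 0 := by omega
    simp only [Nat.toDigitsCore, hnd, if_false]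
    by_cases h10 : 10 ≤ n / 10
    · have hlt : n / 10 < 10 ^ f := by
        have : n < 10 ^ f * 10 := by rw [← pow_succ]; exact h2
        omega
      have := ih (n / 10) (Nat.digitChar (n % 10) :: acc) h10 hlt
      simp at this ⊢
      omega
    · cases f with
      | zero => simp at h2; omega
      | succ f' =>
        have hnd2 : n / 10 / 10 = 0 := by omega
        simp only [Nat.toDigitsCore, hnd2, if_true]
        simp
        omega

-- a number ≥ 100 prints with at least 3 characters
lemma toDigits_len_ge_three (n : Nat) (h : 100 ≤ n) : 3 ≤ (Nat.toDigits 10 n).length := by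
  unfold Nat.toDigits
  have hnd : ¬ n / 10 = 0 := by omega
  simp only [Nat.toDigitsCore, hnd, if_false]
  have hbig : n / 10 < 10 ^ n := by
    have := Nat.lt_pow_self (show 1 < 10 by norm_num) (n := n)
    omega
  have := toDigitsCore_len_ge_two n (n / 10) [Nat.digitChar (n % 10)] (by omega) hbig
  simp at this
  omega

lemma nonmem_neg (h : Int) (hh : h < 0) :
    String.ofList (pyFmt02 h ++ [':', '0', '0']) ∉ hoursA := by
  intro hm
  have hfmt : pyFmt02 h = '-' :: Nat.toDigits 10 h.natAbs := by
    unfold pyFmt02 PySem.Int.toChars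
    rw [if_neg (by omega), if_pos (by omega)]
  simp only [hoursA, List.mem_cons, List.not_mem_nil, or_false] at hm
  rcases hm with e|e|e|e|e|e|e|e|e|e|e <;>
    · have := congrArg String.toList e
      simp [hfmt] at this

lemma nonmem_low (h : Int) (h0 : 0 ≤ h) (h7 : h < 8) :
    String.ofList (pyFmt02 h ++ [':', '0', '0']) ∉ hoursA := by
  interval_cases h <;> decide

lemma nonmem_mid (h : Int) (h1 : 19 ≤ h) (h2 : h ≤ 99) :
    String.ofList (pyFmt02 h ++ [':', '0', '0']) ∉ hoursA := by
  interval_cases h <;> decide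

lemma nonmem_big (h : Int) (hh : 100 ≤ h) :
    String.ofList (pyFmt02 h ++ [':', '0', '0']) ∉ hoursA := by
  intro hm
  have hfmt : pyFmt02 h = Nat.toDigits 10 h.toNat := by
    unfold pyFmt02 PySem.Int.toChars
    rw [if_neg (by omega), if_neg (by omega)]
  have hlen : 3 ≤ (Nat.toDigits 10 h.toNat).length := toDigits_len_ge_three _ (by omega)
  simp only [hoursA, List.mem_cons, List.not_mem_nil, or_false] at hm
  rcases hm with e|e|e|e|e|e|e|e|e|e|e <;>
    · have := congrArg (fun s => s.toList.length) e
      simp [hfmt] at this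
      omega

lemma mem_grid (h : Int) (h1 : 8 ≤ h) (h2 : h ≤ 18) :
    String.ofList (pyFmt02 h ++ [':', '0', '0']) ∈ hoursA := by
  interval_cases h <;> decide

-- the core of the equivalence: A's grid logic equals B's nearest-neighbour search + format
lemma branches_eq (h : Int) :
    (if String.ofList (pyFmt02 h ++ [':', '0', '0']) ∈ hoursA then
       String.ofList (pyFmt02 h ++ [':', '0', '0'])
     else if h < 8 then "08:00"
     else if 18 < h then "18:00"
     else
       match hoursA.find?
           (fun s => decide ((String.ofList (pyFmt02 h ++ [':', '0', '0'])).toList < s.toList)) with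
       | some s => s
       | none => "18:00")
    = (match PySem.List.min? (PySem.List.pyRange 8 19 1) (fun g => |g - h|) with
       | some best => String.ofList (pyFmt02B best ++ [':', '0', '0'])
       | none => "08:00") := by
  have fmtEq : ∀ n : Int, pyFmt02B n = pyFmt02 n := by
    intro n; unfold pyFmt02 pyFmt02B; split_ifs <;> first | rfl | omega
  simp only [fmtEq]
  by_cases hlt : h < 8
  · have hnm : String.ofList (pyFmt02 h ++ [':', '0', '0']) ∉ hoursA := by
      rcases lt_or_ge h 0 with h0 | h0
      · exact nonmem_neg h h0
      · exact nonmem_low h h0 hlt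
    rw [min_low h hlt, if_neg hnm, if_pos hlt]
    decide
  · by_cases hgt : 18 < h
    · have hnm : String.ofList (pyFmt02 h ++ [':', '0', '0']) ∉ hoursA := by
        rcases le_or_gt 100 h with hb | hb
        · exact nonmem_big h hb
        · exact nonmem_mid h (by omega) (by omega)
      rw [min_high h hgt, if_neg hnm, if_neg hlt, if_pos hgt]
      decide
    · rw [min_mid h (by omega) (by omega),
          if_pos (mem_grid h (by omega) (by omega))]

-- ===== VERDICT (by name: the statement is the Claim_ definition above) =====
theorem get_nearest_hour_spec : Claim_equal_get_nearest_hour := by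
  intro s _
  unfold Spec_get_nearest_hour get_nearest_hour get_nearest_hour_alt
  rcases hsp : PySem.Str.split? s ":" with _ | parts
  · rfl
  · rcases parts with _ | ⟨a, _ | ⟨b, _ | ⟨c, rest⟩⟩⟩ <;> try rfl
    rcases ha : PySem.Int.ofStr? a with _ | h0 <;>
      rcases hb : PySem.Int.ofStr? b with _ | m <;> simp only [ha, hb]
    have hround : h0 + (if 30 ≤ m then (1:Int) else 0)
        = (if 30 ≤ m then h0 + 1 else h0) := by split_ifs <;> omega
    rw [hround]
    exact branches_eq _
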